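-- pv_equiv track=rewrite | github.com/NygilNet/leetcode-problems | dailycodingproblem/problem_260.py | reconstructArrayWithClue
-- ===== SOURCE A (Python) =====
-- def reconstructArrayWithClue(clue: list[str]) -> list[int]:
--     N = len(clue)
--     res = [-1] * N
--     current_val = 0
--
--     for i in range(N - 1, -1, -1):
--         current_clue = clue[i]
--
--         if current_clue == "-":
--             res[i] = current_val
--             current_val += 1
--
--     for i in range(N):
--         if res[i] == -1:
--             res[i] = current_val
--             current_val += 1
--
--     return res
-- ===== SOURCE B (Python) =====
-- def reconstructArrayWithClue(clue: list[str]) -> list[int]: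
--     m = clue.count("-")
--     lo, hi = m - 1, m
--     res = []
--     for c in clue:
--         if c == "-":
--             res.append(lo)
--             lo -= 1
--         else:
--             res.append(hi)
--             hi += 1
--     return res
-- ===== Notes on version B (the rewrite author's own statement) =====
-- stated objective: simpler
-- what changed: Replaces A's two opposite-direction passes over an index-mutated array (reverse pass numbering '-' positions, then forward fill pass) with a single forward pass that appends values from two counters lo=m-1 (decrementing on '-') and hi=m (incrementing otherwise), m precomputed as clue.count('-').
import Mathlib
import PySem

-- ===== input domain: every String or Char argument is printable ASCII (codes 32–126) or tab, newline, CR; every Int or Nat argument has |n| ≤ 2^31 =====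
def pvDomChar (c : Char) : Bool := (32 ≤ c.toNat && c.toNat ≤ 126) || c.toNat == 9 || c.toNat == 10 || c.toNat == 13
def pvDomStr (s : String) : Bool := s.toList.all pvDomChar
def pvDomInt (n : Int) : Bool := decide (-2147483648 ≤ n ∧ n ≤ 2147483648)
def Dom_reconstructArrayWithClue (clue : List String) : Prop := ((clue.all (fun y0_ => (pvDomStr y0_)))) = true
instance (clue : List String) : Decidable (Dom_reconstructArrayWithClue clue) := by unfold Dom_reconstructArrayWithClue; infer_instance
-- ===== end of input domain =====

-- B replaces A's two opposite-direction passes over a mutated array with one forward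
-- pass appending from two counters (lo = m-1 down on '-', hi = m up otherwise); objective: simpler.

-- ===== PORT A =====
def reconstructArrayWithClue (clue : List String) : List Int :=
  let N : Int := clue.length
  let res : List Int := List.replicate clue.length (-1)
  -- first loop: for i in range(N-1, -1, -1)
  let st1 := (PySem.List.pyRange (N - 1) (-1) (-1)).foldl
    (fun (st : List Int × Int) i =>
      if PySem.List.pyGetD clue i "" = "-"
      then (PySem.List.pySetD st.1 i st.2, st.2 + 1) else st)
    (res, 0)
  -- second loop: for i in range(N)
  let st2 := (PySem.List.pyRange 0 N 1).foldl
    (fun (st : List Int × Int) i =>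
      if PySem.List.pyGetD st.1 i 0 = -1
      then (PySem.List.pySetD st.1 i st.2, st.2 + 1) else st)
    st1
  st2.1

-- ===== PORT B =====
def reconstructArrayWithClue_alt (clue : List String) : List Int :=
  let m : Int := PySem.List.count clue "-"
  let st := clue.foldl
    (fun (st : List Int × Int × Int) c =>
      if c = "-" then (st.1 ++ [st.2.1], st.2.1 - 1, st.2.2)
      else (st.1 ++ [st.2.2], st.2.1, st.2.2 + 1))
    ([], m - 1, m)
  st.1

-- ===== PRECONDITION & SPEC =====
def Spec_reconstructArrayWithClue (clue : List String) (out : List Int) : Prop := out = reconstructArrayWithClue_alt clue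
instance (clue : List String) (out : List Int) : Decidable (Spec_reconstructArrayWithClue clue out) := by unfold Spec_reconstructArrayWithClue; infer_instance

-- ===== CLAIM (what is proved, stated in full; the proofs are below) =====
def Claim_equal_reconstructArrayWithClue : Prop := ∀ (clue : List String), Dom_reconstructArrayWithClue clue → Spec_reconstructArrayWithClue clue (reconstructArrayWithClue clue)

-- ===== LEMMAS AND PROOFS =====

-- Structural model of A's first (reverse) pass: right-to-left numbering of '-' positions,
-- other positions left at -1; second component is the running counter.
def markv : List String → Int → List Int × Int
  | [], v => ([], v)
  | c :: cs, v =>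
      let p := markv cs v
      if c = "-" then (p.2 :: p.1, p.2 + 1) else (-1 :: p.1, p.2)

-- Structural model of A's second (forward) pass: fill each -1 with v, v+1, …
def fill2 : List Int → Int → List Int × Int
  | [], v => ([], v)
  | x :: xs, v =>
      if x = -1 then
        let p := fill2 xs (v + 1)
        (v :: p.1, p.2)
      else
        let p := fill2 xs v
        (x :: p.1, p.2)

-- Structural model of B's single pass.
def brec : List String → Int → Int → List Int
  | [], _, _ => []
  | c :: cs, lo, hi =>
      if c = "-" then lo :: brec cs (lo - 1) hi else hi :: brec cs lo (hi + 1)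

theorem markv_snd (cs : List String) (v : Int) :
    (markv cs v).2 = v + List.count "-" cs := by
  induction cs with
  | nil => simp [markv]
  | cons c cs ih =>
      simp only [markv, List.count_cons]
      by_cases h : c = "-"
      · simp [h, ih]; omega
      · simp [h, ih]

theorem getD_append_length {α : Type} (pre : List α) (y : α) (ys : List α) (d : α) :
    (pre ++ y :: ys).getD pre.length d = y := by
  induction pre with
  | nil => simp
  | cons a pre ih => simpa using ih

theorem set_append_length {α : Type} (pre : List α) (y : α) (ys : List α) (v : α) :
    (pre ++ y :: ys).set pre.length v = pre ++ v :: ys := by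
  induction pre with
  | nil => simp
  | cons a pre ih => simpa using ih

theorem set_replicate_append (n : Nat) (v : Int) (r : List Int) :
    (List.replicate (n + 1) (-1 : Int)).set n v ++ r = List.replicate n (-1 : Int) ++ v :: r := by
  induction n with
  | zero => simp
  | succ n ih =>
      have ih' := ih
      rw [List.replicate_succ] at ih'
      simp only [List.replicate_succ, List.set_cons_succ, List.cons_append, ih']

-- A's first pass, as a foldr over ascending indices, computes markv.
theorem loop1_eq (cs : List String) : ∀ (pre : List String) (v : Int),
    ((List.range cs.length).foldr
      (fun k (st : List Int × Int) =>
        if PySem.List.pyGetD (pre ++ cs) ((pre.length + k : Nat) : Int) "" = "-"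
        then (PySem.List.pySetD st.1 ((pre.length + k : Nat) : Int) st.2, st.2 + 1) else st)
      (List.replicate (pre.length + cs.length) (-1 : Int), v))
    = (List.replicate pre.length (-1 : Int) ++ (markv cs v).1, (markv cs v).2) := by
  induction cs with
  | nil => intro pre v; simp [markv]
  | cons c cs ih =>
      intro pre v
      have hlist : pre ++ c :: cs = (pre ++ [c]) ++ cs := by simp
      have hlen : ∀ k : Nat, pre.length + (k + 1) = (pre ++ [c]).length + k := by
        intro k; simp; omega
      rw [List.length_cons, List.range_succ_eq_map, List.foldr_cons, List.foldr_map]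
      have hrepl : List.replicate (pre.length + (cs.length + 1)) (-1 : Int)
          = List.replicate ((pre ++ [c]).length + cs.length) (-1 : Int) := by
        congr 1; simp; omega
      have hinner :
          ((List.range cs.length).foldr
            (fun k (st : List Int × Int) =>
              if PySem.List.pyGetD (pre ++ c :: cs) ((pre.length + Nat.succ k : Nat) : Int) "" = "-"
              then (PySem.List.pySetD st.1 ((pre.length + Nat.succ k : Nat) : Int) st.2, st.2 + 1) else st)
            (List.replicate (pre.length + (cs.length + 1)) (-1 : Int), v))
          = (List.replicate (pre ++ [c]).length (-1 : Int) ++ (markv cs v).1, (markv cs v).2) := by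
        rw [hrepl]
        have := ih (pre ++ [c]) v
        rw [← hlist] at this
        convert this using 2
        funext k st
        rw [show pre.length + Nat.succ k = (pre ++ [c]).length + k from hlen k]
      rw [hinner]
      have hget : PySem.List.pyGetD (pre ++ c :: cs) ((pre.length + 0 : Nat) : Int) "" = c := by
        rw [PySem.List.pyGetD_natCast]
        simpa using getD_append_length pre c cs ""
      by_cases hc : c = "-"
      · subst hc
        simp [markv, PySem.List.pySetD_natCast, set_replicate_append]
      · simp [hc, markv, List.replicate_succ' (n := pre.length), List.append_assoc]

-- A's second pass computes fill2.
theorem loop2_eq (suf : List Int) : ∀ (pre : List Int) (v : Int),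
    ((List.range suf.length).foldl
      (fun (st : List Int × Int) k =>
        if PySem.List.pyGetD st.1 ((pre.length + k : Nat) : Int) 0 = -1
        then (PySem.List.pySetD st.1 ((pre.length + k : Nat) : Int) st.2, st.2 + 1) else st)
      (pre ++ suf, v))
    = (pre ++ (fill2 suf v).1, (fill2 suf v).2) := by
  induction suf with
  | nil => intro pre v; simp [fill2]
  | cons x xs ih =>
      intro pre v
      rw [List.length_cons, List.range_succ_eq_map, List.foldl_cons, List.foldl_map]
      have hget : PySem.List.pyGetD (pre ++ x :: xs) ((pre.length + 0 : Nat) : Int) 0 = x := by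
        rw [PySem.List.pyGetD_natCast]; simpa using getD_append_length pre x xs 0
      have hlen : ∀ (y : Int) (k : Nat), pre.length + Nat.succ k = (pre ++ [y]).length + k := by
        intro y k; simp; omega
      by_cases hx : x = -1
      · subst hx
        have hstep : (if PySem.List.pyGetD (pre ++ (-1 : Int) :: xs) ((pre.length + 0 : Nat) : Int) 0 = -1
            then (PySem.List.pySetD (pre ++ (-1 : Int) :: xs) ((pre.length + 0 : Nat) : Int) v, v + 1)
            else (pre ++ (-1 : Int) :: xs, v)) = ((pre ++ [v]) ++ xs, v + 1) := by
          rw [if_pos (by rw [hget]), PySem.List.pySetD_natCast]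
          simpa using set_append_length pre (-1 : Int) xs v
        rw [hstep]
        have hconv :
            ((List.range xs.length).foldl
              (fun (st : List Int × Int) k =>
                if PySem.List.pyGetD st.1 ((pre.length + Nat.succ k : Nat) : Int) 0 = -1
                then (PySem.List.pySetD st.1 ((pre.length + Nat.succ k : Nat) : Int) st.2, st.2 + 1) else st)
              ((pre ++ [v]) ++ xs, v + 1))
            = ((pre ++ [v]) ++ (fill2 xs (v + 1)).1, (fill2 xs (v + 1)).2) := by
          convert ih (pre ++ [v]) (v + 1) using 2
          funext st k
          rw [hlen v k]
        rw [hconv]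
        simp [fill2]
      · have hstep : (if PySem.List.pyGetD (pre ++ x :: xs) ((pre.length + 0 : Nat) : Int) 0 = -1
            then (PySem.List.pySetD (pre ++ x :: xs) ((pre.length + 0 : Nat) : Int) v, v + 1)
            else (pre ++ x :: xs, v)) = ((pre ++ [x]) ++ xs, v) := by
          rw [if_neg (by rw [hget]; exact hx)]
          simp
        rw [hstep]
        have hconv :
            ((List.range xs.length).foldl
              (fun (st : List Int × Int) k =>
                if PySem.List.pyGetD st.1 ((pre.length + Nat.succ k : Nat) : Int) 0 = -1
                then (PySem.List.pySetD st.1 ((pre.length + Nat.succ k : Nat) : Int) st.2, st.2 + 1) else st)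
              ((pre ++ [x]) ++ xs, v))
            = ((pre ++ [x]) ++ (fill2 xs v).1, (fill2 xs v).2) := by
          convert ih (pre ++ [x]) v using 2
          funext st k
          rw [hlen x k]
        rw [hconv]
        simp [fill2, hx]

-- B's single pass computes brec.
theorem bfold_eq (cs : List String) : ∀ (acc : List Int) (lo hi : Int),
    (cs.foldl
      (fun (st : List Int × Int × Int) c =>
        if c = "-" then (st.1 ++ [st.2.1], st.2.1 - 1, st.2.2)
        else (st.1 ++ [st.2.2], st.2.1, st.2.2 + 1))
      (acc, lo, hi)).1 = acc ++ brec cs lo hi := by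
  induction cs with
  | nil => intro acc lo hi; simp [brec]
  | cons c cs ih =>
      intro acc lo hi
      by_cases hc : c = "-" <;> simp [brec, hc, ih]

-- Core equivalence: filling markv's gaps forward equals B's two-counter pass.
theorem fill_markv_eq_brec (cs : List String) : ∀ (v w : Int), 0 ≤ v →
    (fill2 (markv cs v).1 w).1 = brec cs ((markv cs v).2 - 1) w := by
  induction cs with
  | nil => intro v w _; simp [markv, fill2, brec]
  | cons c cs ih =>
      intro v w hv
      have hk : (markv cs v).2 = v + List.count "-" cs := markv_snd cs v
      have hkne : (markv cs v).2 ≠ -1 := by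
        have : (0 : Int) ≤ List.count "-" cs := by positivity
        omega
      by_cases hc : c = "-"
      · simp only [markv, hc, brec]
        simp [fill2, hkne, ih v w hv]
      · simp only [markv, brec, if_neg hc]
        simp [fill2, ih v (w + 1) hv]

theorem markv_length (cs : List String) (v : Int) : (markv cs v).1.length = cs.length := by
  induction cs with
  | nil => simp [markv]
  | cons c cs ih => by_cases h : c = "-" <;> simp [markv, h, ih]

-- ===== VERDICT (by name: the statement is the Claim_ definition above) =====
theorem reconstructArrayWithClue_spec : Claim_equal_reconstructArrayWithClue := by
  intro clue _
  unfold Spec_reconstructArrayWithClue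
  simp only [reconstructArrayWithClue, reconstructArrayWithClue_alt]
  rw [bfold_eq]
  have e1 : PySem.List.pyRange ((clue.length : Int) - 1) (-1) (-1)
      = (List.map (fun k : Nat => (k : Int)) (List.range clue.length)).reverse := by
    rw [PySem.List.pyRange_neg_one_eq_reverse,
        show ((-1 : Int) + 1) = 0 by norm_num,
        show ((clue.length : Int) - 1) + 1 = (clue.length : Int) by ring,
        PySem.List.pyRange_zero_natCast]
  rw [e1, List.foldl_reverse, List.foldr_map]
  have h1 := loop1_eq clue [] 0
  simp only [List.nil_append, List.length_nil, Nat.zero_add, List.replicate_zero] at h1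
  rw [h1]
  rw [PySem.List.pyRange_zero_natCast, List.foldl_map]
  have h2 := loop2_eq (markv clue 0).1 [] (markv clue 0).2
  simp only [List.nil_append, List.length_nil, Nat.zero_add, markv_length] at h2
  rw [h2]
  rw [fill_markv_eq_brec clue 0 _ (le_refl 0), markv_snd, PySem.List.count_eq]
  simp
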